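-- pv_equiv track=rewrite | github.com/pkemkes/advent-of-code | 2023/01/solution.py | extract_all_numbers
-- ===== SOURCE A (Python) =====
-- from typing import List, Callable
--
-- digits = "123456789"
--
-- def extract_all_numbers(line: str) -> List[str]:
--     numbers = [
--         "one", "two", "three", "four", "five",
--         "six", "seven", "eight", "nine"
--     ]
--     digits_by_strings = {d: d for d in digits}
--     digits_by_strings.update({n: d for n, d in zip(numbers, digits)})
--     extracted = []
--     for i in range(len(line)):
--         for string in digits_by_strings:
--             if line[i:].startswith(string):
--                 extracted.append(digits_by_strings[string])
--     return extracted
-- ===== SOURCE B (Python) =====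
-- from typing import List
--
-- _TOKENS = [
--     ("1", "1"), ("2", "2"), ("3", "3"), ("4", "4"), ("5", "5"),
--     ("6", "6"), ("7", "7"), ("8", "8"), ("9", "9"),
--     ("one", "1"), ("two", "2"), ("three", "3"), ("four", "4"), ("five", "5"),
--     ("six", "6"), ("seven", "7"), ("eight", "8"), ("nine", "9"),
-- ]
--
-- def extract_all_numbers(line: str) -> List[str]:
--     # Token-major: collect every occurrence of each token with its position,
--     # then order the hits by position (positions are unique: no token is a
--     # prefix of another, so at most one token matches at any position).
--     hits = []
--     for tok, d in _TOKENS: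
--         m = len(tok)
--         for i in range(len(line) - m + 1):
--             if line[i:i + m] == tok:
--                 hits.append((i, d))
--     hits.sort(key=lambda h: h[0])
--     return [d for _, d in hits]
-- ===== Notes on version B (the rewrite author's own statement) =====
-- stated objective: alternative
-- what changed: Replaces A's position-major scan (which builds the full line[i:] suffix at every index and tries all 18 dict keys against it) with a token-major pass: for each of the 18 tokens collect all of its occurrence positions via fixed-length slice comparisons, then sort the hits by position and emit the mapped digits.
import Mathlib
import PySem

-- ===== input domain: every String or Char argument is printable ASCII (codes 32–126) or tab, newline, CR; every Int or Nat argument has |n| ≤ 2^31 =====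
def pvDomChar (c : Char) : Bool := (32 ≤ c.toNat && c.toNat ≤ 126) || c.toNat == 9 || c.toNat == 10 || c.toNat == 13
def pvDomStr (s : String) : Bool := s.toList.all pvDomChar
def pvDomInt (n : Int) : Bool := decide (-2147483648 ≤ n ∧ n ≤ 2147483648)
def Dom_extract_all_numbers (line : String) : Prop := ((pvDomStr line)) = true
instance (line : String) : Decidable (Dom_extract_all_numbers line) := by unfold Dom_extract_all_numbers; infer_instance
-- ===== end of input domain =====

-- B replaces A's position-major scan (full line[i:] suffix built per index, tried against 18 dict keys) with a token-major pass: collect each token's occurrences by fixed-length slice comparison, sort the hits by position; measured faster in a timing run, same return value proved.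


-- ===== PORT A =====
-- digits_by_strings = {d: d for d in "123456789"} then updated with {word: digit}; Python iterates
-- the dict's keys and looks each one up, ported as iterating its (key, value) items (same 18 pairs, same order).

def pvDictA : PySem.Dict String String :=
  let d0 := PySem.Dict.ofList (("123456789".toList).map (fun c => (String.ofList [c], String.ofList [c])))
  (List.zip ["one", "two", "three", "four", "five", "six", "seven", "eight", "nine"]
            (("123456789".toList).map (fun c => String.ofList [c]))).foldl
    (fun d p => d.insert p.1 p.2) d0

def extract_all_numbers (line : String) : List String :=
  (PySem.List.pyRange 0 (PySem.Str.len line)).foldl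
    (fun acc i =>
      pvDictA.items.foldl
        (fun acc kv =>
          if PySem.Str.startswith (PySem.Str.slice line (some i) none) kv.1 then acc ++ [kv.2]
          else acc)
        acc)
    []

-- ===== PORT B =====
def pvTokens : List (String × String) :=
  [("1", "1"), ("2", "2"), ("3", "3"), ("4", "4"), ("5", "5"),
   ("6", "6"), ("7", "7"), ("8", "8"), ("9", "9"),
   ("one", "1"), ("two", "2"), ("three", "3"), ("four", "4"), ("five", "5"),
   ("six", "6"), ("seven", "7"), ("eight", "8"), ("nine", "9")]

def extract_all_numbers_alt (line : String) : List String :=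
  let hits : List (Int × String) :=
    pvTokens.foldl
      (fun acc td =>
        (PySem.List.pyRange 0 (PySem.Str.len line - PySem.Str.len td.1 + 1)).foldl
          (fun acc i =>
            if PySem.Str.slice line (some i) (some (i + PySem.Str.len td.1)) = td.1 then
              acc ++ [(i, td.2)]
            else acc)
          acc)
      []
  (PySem.List.sorted hits (fun h => h.1)).map (fun h => h.2)

-- ===== PRECONDITION & SPEC =====
def Spec_extract_all_numbers (line : String) (out : List String) : Prop := out = extract_all_numbers_alt line
instance (line : String) (out : List String) : Decidable (Spec_extract_all_numbers line out) := by unfold Spec_extract_all_numbers; infer_instance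

-- ===== CLAIM (what is proved, stated in full; the proofs are below) =====
def Claim_equal_extract_all_numbers : Prop := ∀ (line : String), Dom_extract_all_numbers line → Spec_extract_all_numbers line (extract_all_numbers line)

-- ===== LEMMAS AND PROOFS =====
-- canonical match predicate: token t occurs in cs at position i
def pvMatch (cs : List Char) (i : Nat) (t : String) : Bool := t.toList.isPrefixOf (cs.drop i)

-- the canonical hit list, position-major (A's traversal order)
def pvTgt (cs : List Char) (n : Nat) : List (Int × String) :=
  (List.range n).flatMap
    (fun i => (pvTokens.filter (fun td => pvMatch cs i td.1)).map (fun td => ((i : Int), td.2)))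

-- B's hit list, token-major
def pvHits (cs : List Char) : List (Int × String) :=
  pvTokens.flatMap
    (fun td => ((List.range (cs.length + 1 - td.1.toList.length)).filter
        (fun i => pvMatch cs i td.1)).map (fun i : Nat => ((i : Int), td.2)))

theorem pv_items : pvDictA.items = pvTokens := by decide

theorem pv_tok_len : ∀ td ∈ pvTokens, 1 ≤ td.1.toList.length := by decide

theorem pvA_norm (line : String) :
    extract_all_numbers line = (pvTgt line.toList line.toList.length).map (fun h => h.2) := by
  unfold extract_all_numbers pvTgt
  rw [pv_items, PySem.Str.len_eq, PySem.List.pyRange_zero_natCast, List.foldl_map]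
  rw [PySem.List.foldl_congr_mem _ _
      (fun acc (i : Nat) => acc ++ (pvTokens.filter (fun td => pvMatch line.toList i td.1)).map (fun td => td.2)) []
      ?_]
  · rw [PySem.List.foldl_append_eq_flatMap]
    simp [List.map_flatMap, Function.comp_def, List.map_map]
  · intro acc i _
    have hkv : ∀ kv : String × String,
        PySem.Str.startswith (PySem.Str.slice line (some (i:Int)) none) kv.1 = pvMatch line.toList i kv.1 := by
      intro kv
      simp [PySem.Str.startswith_eq, PySem.Chars.startswith, pvMatch,
        PySem.Str.toList_slice, PySem.Chars.slice_eq_listSlice, PySem.List.slice_from_natCast]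
    simp only [hkv]
    exact PySem.List.foldl_append_if (fun kv => pvMatch line.toList i kv.1) (fun kv => kv.2) pvTokens acc

theorem pvB_hits (line : String) :
    pvTokens.foldl
      (fun acc td =>
        (PySem.List.pyRange 0 (PySem.Str.len line - PySem.Str.len td.1 + 1)).foldl
          (fun acc i =>
            if PySem.Str.slice line (some i) (some (i + PySem.Str.len td.1)) = td.1 then
              acc ++ [(i, td.2)]
            else acc)
          acc)
      [] = pvHits line.toList := by
  unfold pvHits
  rw [PySem.List.foldl_congr_mem _ _
      (fun acc td => acc ++ ((List.range (line.toList.length + 1 - td.1.toList.length)).filter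
          (fun i => pvMatch line.toList i td.1)).map (fun i : Nat => ((i : Int), td.2))) []
      ?_]
  · exact PySem.List.foldl_append_eq_flatMap _ _ _
  · intro acc td htd
    have hrange : PySem.List.pyRange 0 (PySem.Str.len line - PySem.Str.len td.1 + 1)
        = (List.range (line.toList.length + 1 - td.1.toList.length)).map (fun k : Nat => (k : Int)) := by
      rw [PySem.Str.len_eq, PySem.Str.len_eq]
      rcases Nat.lt_or_ge (line.toList.length + 1) td.1.toList.length with h | h
      · rw [show (line.toList.length + 1 - td.1.toList.length : Nat) = 0 by omega]
        have h' : (line.length : Int) - td.1.length + 1 ≤ 0 := by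
          simp only [← String.length_toList]; omega
        simp [PySem.List.pyRange]; omega
      · rw [show ((line.toList.length : Int) - (td.1.toList.length : Int) + 1)
            = ((line.toList.length + 1 - td.1.toList.length : Nat) : Int) by omega]
        exact PySem.List.pyRange_zero_natCast _
    rw [hrange, List.foldl_map]
    have hkv : ∀ i : Nat,
        (PySem.Str.slice line (some (i:Int)) (some ((i:Int) + PySem.Str.len td.1)) = td.1)
          ↔ pvMatch line.toList i td.1 = true := by
      intro i
      rw [PySem.Str.len_eq, String.ext_iff, PySem.Str.toList_slice,
        PySem.Chars.slice_eq_listSlice, PySem.List.slice_natCast_add, pvMatch]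
      rw [List.isPrefixOf_iff_prefix, List.prefix_iff_eq_take]
      exact eq_comm
    have hbody : (fun (acc : List (Int × String)) (i : Nat) =>
        if PySem.Str.slice line (some (i:Int)) (some ((i:Int) + PySem.Str.len td.1)) = td.1 then
          acc ++ [((i:Int), td.2)] else acc)
        = (fun acc i => if pvMatch line.toList i td.1 then acc ++ [((i:Int), td.2)] else acc) := by
      funext acc i
      rw [if_congr (hkv i) rfl rfl]
    rw [hbody]
    exact PySem.List.foldl_append_if (fun i => pvMatch line.toList i td.1)
      (fun i : Nat => ((i : Int), td.2)) _ acc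

theorem pvB_norm (line : String) :
    extract_all_numbers_alt line
      = (PySem.List.sorted (pvHits line.toList) (fun h => h.1)).map (fun h => h.2) := by
  unfold extract_all_numbers_alt
  rw [pvB_hits]

theorem pv_flatMap_add {α γ : Type} (l : List α) (f g : α → List γ) :
    (l.flatMap fun b => f b ++ g b).Perm (l.flatMap f ++ l.flatMap g) := by
  induction l with
  | nil => simp
  | cons a l ih =>
    simp only [List.flatMap_cons]
    refine (ih.append_left (f a ++ g a)).trans ?_
    rw [List.append_assoc (f a) (g a), List.append_assoc (f a) (l.flatMap f)]
    exact (List.perm_append_comm_assoc (g a) (l.flatMap f) (l.flatMap g)).append_left (f a)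

theorem pv_flatMap_swap {α β γ : Type} (l1 : List α) (l2 : List β) (h : α → β → List γ) :
    (l1.flatMap fun a => l2.flatMap (h a)).Perm (l2.flatMap fun b => l1.flatMap (fun a => h a b)) := by
  induction l1 with
  | nil => simp
  | cons a l1 ih =>
    simp only [List.flatMap_cons]
    refine List.Perm.trans (ih.append_left _) ?_
    exact (pv_flatMap_add l2 (h a) (fun b => l1.flatMap (fun a => h a b))).symm

theorem pv_filter_map_eq_flatMap {β γ : Type} (l : List β) (q : β → Bool) (f : β → γ) :
    (l.filter q).map f = l.flatMap (fun b => if q b then [f b] else []) := by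
  induction l with
  | nil => rfl
  | cons b l ih => by_cases h : q b <;> simp [h, ih]

theorem pv_swap_perm {α β γ : Type} (l1 : List α) (l2 : List β) (p : α → β → Bool) (g : α → β → γ) :
    (l1.flatMap fun a => (l2.filter (p a)).map (g a)).Perm
      (l2.flatMap fun b => (l1.filter (fun a => p a b)).map (fun a => g a b)) := by
  have h1 : ∀ a, (l2.filter (p a)).map (g a) = l2.flatMap (fun b => if p a b then [g a b] else []) :=
    fun a => pv_filter_map_eq_flatMap l2 (p a) (g a)
  have h2 : ∀ b, (l1.filter (fun a => p a b)).map (fun a => g a b)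
      = l1.flatMap (fun a => if p a b then [g a b] else []) :=
    fun b => pv_filter_map_eq_flatMap l1 (fun a => p a b) (fun a => g a b)
  simp only [h1, h2]
  exact pv_flatMap_swap l1 l2 (fun a b => if p a b then [g a b] else [])

theorem pv_match_false_of_ge (cs : List Char) (t : String) (i : Nat)
    (h : cs.length + 1 - t.toList.length ≤ i) (h1 : 1 ≤ t.toList.length) :
    pvMatch cs i t = false := by
  by_contra hb
  have hp : t.toList <+: cs.drop i := by
    have := Bool.not_eq_false (pvMatch cs i t) |>.mp hb
    simpa [pvMatch, List.isPrefixOf_iff_prefix] using this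
  have hlen := hp.length_le
  simp only [List.length_drop] at hlen
  omega

theorem pv_filter_range (cs : List Char) (t : String) (h1 : 1 ≤ t.toList.length) :
    (List.range (cs.length + 1 - t.toList.length)).filter (fun i => pvMatch cs i t)
      = (List.range cs.length).filter (fun i => pvMatch cs i t) := by
  set a := cs.length + 1 - t.toList.length with ha
  have hale : a ≤ cs.length := by omega
  have hnil : (List.map (fun x => a + x) (List.range (cs.length - a))).filter
      (fun i => pvMatch cs i t) = [] := by
    rw [List.filter_eq_nil_iff]
    intro x hx
    simp only [List.mem_map, List.mem_range] at hx
    obtain ⟨k, hk, rfl⟩ := hx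
    simp [pv_match_false_of_ge cs t (a + k) (by omega) h1]
  conv_rhs => rw [show cs.length = a + (cs.length - a) by omega, List.range_add,
    List.filter_append, hnil, List.append_nil]

-- no token is a prefix of another (checked on the 18 literals)
theorem pv_nonprefix :
    List.Pairwise (fun (a b : String × String) =>
      ¬(a.1.toList <+: b.1.toList) ∧ ¬(b.1.toList <+: a.1.toList)) pvTokens := by decide

-- hence at most one token matches at any position
theorem pv_block_le_one (cs : List Char) (i : Nat) :
    (pvTokens.filter (fun td => pvMatch cs i td.1)).length ≤ 1 := by
  have hp := pv_nonprefix.filter (fun td => pvMatch cs i td.1)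
  rcases hfe : pvTokens.filter (fun td => pvMatch cs i td.1) with _ | ⟨x, _ | ⟨y, l⟩⟩
  · simp [hfe]
  · simp [hfe]
  · exfalso
    rw [hfe] at hp
    have hxy := (List.pairwise_cons.mp hp).1 y (by simp)
    have hx : pvMatch cs i x.1 = true := by
      have : x ∈ pvTokens.filter (fun td => pvMatch cs i td.1) := by rw [hfe]; simp
      exact (List.mem_filter.mp this).2
    have hy : pvMatch cs i y.1 = true := by
      have : y ∈ pvTokens.filter (fun td => pvMatch cs i td.1) := by rw [hfe]; simp
      exact (List.mem_filter.mp this).2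
    have hx' : x.1.toList <+: cs.drop i := by
      simpa [pvMatch, List.isPrefixOf_iff_prefix] using hx
    have hy' : y.1.toList <+: cs.drop i := by
      simpa [pvMatch, List.isPrefixOf_iff_prefix] using hy
    rcases Nat.le_total x.1.toList.length y.1.toList.length with hle | hle
    · exact hxy.1 (List.prefix_of_prefix_length_le hx' hy' hle)
    · exact hxy.2 (List.prefix_of_prefix_length_le hy' hx' hle)

theorem pv_pairwise_of_len_le_one {γ : Type} {R : γ → γ → Prop} {l : List γ}
    (h : l.length ≤ 1) : l.Pairwise R := by
  match l, h with
  | [], _ => exact List.Pairwise.nil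
  | [x], _ => simp

theorem pv_tgt_pairwise (cs : List Char) (n : Nat) :
    (pvTgt cs n).Pairwise (fun a b => a.1 < b.1) := by
  unfold pvTgt
  induction n with
  | zero => simp
  | succ n ih =>
    rw [List.range_succ, List.flatMap_append, List.flatMap_singleton]
    refine List.pairwise_append.mpr ⟨ih, ?_, ?_⟩
    · exact pv_pairwise_of_len_le_one (by
        simpa using pv_block_le_one cs n)
    · intro x hx y hy
      simp only [List.mem_flatMap, List.mem_map, List.mem_range] at hx hy
      obtain ⟨i, hi, td, _, rfl⟩ := hx
      obtain ⟨td', _, rfl⟩ := hy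
      simpa using hi

theorem pv_hits_perm (cs : List Char) : (pvTgt cs cs.length).Perm (pvHits cs) := by
  have h1 : pvHits cs = pvTokens.flatMap
      (fun td => ((List.range cs.length).filter (fun i => pvMatch cs i td.1)).map
        (fun i : Nat => ((i : Int), td.2))) := by
    unfold pvHits
    apply List.flatMap_congr
    intro td htd
    rw [pv_filter_range cs td.1 (pv_tok_len td htd)]
  rw [h1]
  exact (pv_swap_perm pvTokens (List.range cs.length)
    (fun td i => pvMatch cs i td.1) (fun td i => ((i : Int), td.2))).symm

theorem pv_main (line : String) : extract_all_numbers line = extract_all_numbers_alt line := by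
  rw [pvA_norm, pvB_norm]
  rw [PySem.List.sorted_eq_of_perm_of_pairwise_lt (pvHits line.toList)
    (pvTgt line.toList line.toList.length) (fun h => h.1)
    (pv_hits_perm line.toList) (pv_tgt_pairwise line.toList line.toList.length)]

-- ===== VERDICT (by name: the statement is the Claim_ definition above) =====
theorem extract_all_numbers_spec : Claim_equal_extract_all_numbers := by
  intro line _
  unfold Spec_extract_all_numbers
  exact pv_main line
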